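-- pv_equiv track=rewrite | github.com/benpomeranz/Cryptography-Implementations | PSET4/4-relatedkeys/relatedKeysSoln.py | relatedkeys
-- ===== SOURCE A (Python) =====
-- def inv(a, b):
--     x1, y1 = 1, 0
--     x2, y2 = 0, 1
--     while(b!=0):
--         x1c =x1
--         y1c =y1
--         x1, y1 = x2, y2
--         x2, y2 = x1c - (a//b)*x2, y1c - (a//b)*y2
--         a, b = b, a%b
--     return x1
--
-- def modpow(a,n,m):
--     prod = 1
--     if n < 0:
--         a = inv(a, m)
--         n *= -1
--     while n > 0:
--         if n % 2 == 1:
--             prod = (prod * a) % m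
--             n = n - 1
--         n = n//2
--         a = (a**2) % m
--     return prod
--
-- def relatedkeys(g,p,A,c11,c12,m1,c21,c22):
--     # your code here
--     Ak1 = c12*inv(m1, p) % p
--     u = None
--     v = None
--     for i in range(1, 101):
--         for j in range(1, 101):
--             if((modpow(c11, i, p)*modpow(g, j, p) % p) == c21):
--                 u = i
--                 v = j
--     Ak2 = modpow(Ak1, u, p)*modpow(A, v, p) % p
--     return c22*inv(Ak2, p) % p
-- ===== SOURCE B (Python) =====
-- def egcd(a, b):
--     # recursive extended Euclid; returns Bezout pair (x, y) for (a, b)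
--     if b == 0:
--         return (1, 0)
--     x, y = egcd(b, a % b)
--     return (y, x - (a // b) * y)
--
-- def inv(a, b):
--     return egcd(a, b)[0]
--
-- def relatedkeys(g, p, A, c11, c12, m1, c21, c22):
--     Ak1 = c12 * inv(m1, p) % p
--     # index every value c11^i * g^j mod p via incrementally maintained powers;
--     # ascending insertion order reproduces the last-match (largest i, then j) choice
--     d = {}
--     pi = 1
--     for i in range(1, 101):
--         pi = pi * c11 % p
--         pij = pi
--         for j in range(1, 101):
--             pij = pij * g % p
--             d[pij] = (i, j)
--     u, v = d[c21]
--     Ak2 = pow(Ak1, u, p) * pow(A, v, p) % p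
--     return c22 * inv(Ak2, p) % p
-- ===== Notes on version B (the rewrite author's own statement) =====
-- stated objective: alternative
-- what changed: Replaces the 100x100 rescan that recomputes two square-and-multiply modpows per cell with incrementally maintained modular powers inserted once into a dict keyed by c11^i*g^j mod p followed by a single lookup of c21 (ascending insertion preserves A's last-match tie-break), and replaces the hand-written iterative modular arithmetic with recursive extended Euclid and the built-in three-argument pow; this does constant-factor less work per cell, though the fixed 100x100 size makes that unmeasurable in a timing run.
import Mathlib
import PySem

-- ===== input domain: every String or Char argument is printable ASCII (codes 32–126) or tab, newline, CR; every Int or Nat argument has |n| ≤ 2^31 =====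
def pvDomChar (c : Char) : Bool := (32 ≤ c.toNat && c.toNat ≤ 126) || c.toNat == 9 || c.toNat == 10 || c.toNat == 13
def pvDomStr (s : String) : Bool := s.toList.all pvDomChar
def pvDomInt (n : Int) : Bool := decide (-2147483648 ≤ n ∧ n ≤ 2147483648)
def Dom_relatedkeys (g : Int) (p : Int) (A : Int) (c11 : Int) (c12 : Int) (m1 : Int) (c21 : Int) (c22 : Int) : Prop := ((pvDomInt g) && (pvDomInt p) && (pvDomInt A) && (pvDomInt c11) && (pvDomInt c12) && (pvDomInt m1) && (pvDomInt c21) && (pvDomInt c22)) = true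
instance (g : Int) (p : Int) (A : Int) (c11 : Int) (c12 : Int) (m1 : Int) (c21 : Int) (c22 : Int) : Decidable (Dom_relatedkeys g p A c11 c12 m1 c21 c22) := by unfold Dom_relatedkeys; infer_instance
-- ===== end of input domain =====

-- B replaces A's 100×100 search (which recomputes two hand-written modpows per cell) by
-- incrementally maintained modular powers inserted once into a dict keyed by c11^i*g^j mod p,
-- then a single lookup of c21 (ascending insertion keeps A's last-match choice), and replaces
-- A's iterative extended Euclid / square-and-multiply with recursive egcd and built-in pow.
-- Objective: alternative (fewer modular operations per cell; fixed problem size, speed not measured).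

-- ===== PORT A =====
-- termination helper for the Euclid loops (cited by invLoop's and recEgcd's decreasing_by)
theorem pmod_natAbs_lt (a b : Int) (hb : b ≠ 0) : (PySem.Int.mod a b).natAbs < b.natAbs := by
  rcases lt_or_gt_of_ne hb with h | h
  · have := PySem.Int.mod_neg_bounds a h; omega
  · have h1 := PySem.Int.mod_nonneg a h
    have h2 := PySem.Int.mod_lt a h
    omega

-- while b != 0: x1,y1 = x2,y2; x2,y2 = x1c-(a//b)*x2, y1c-(a//b)*y2; a,b = b, a%b
def invLoop (x1 y1 x2 y2 a b : Int) : Int :=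
  if hb : b = 0 then x1
  else invLoop x2 y2 (x1 - PySem.Int.floordiv a b * x2) (y1 - PySem.Int.floordiv a b * y2)
    b (PySem.Int.mod a b)
termination_by b.natAbs
decreasing_by exact pmod_natAbs_lt a b hb

def pyInv (a b : Int) : Int := invLoop 1 0 0 1 a b

-- while n > 0: if n%2==1: prod=(prod*a)%m; n=n-1;  n=n//2; a = a**2 % m
def modpowLoop (prod a n m : Int) : Int :=
  if hn : 0 < n then
    if PySem.Int.mod n 2 = 1 then
      modpowLoop (PySem.Int.mod (prod * a) m) (PySem.Int.mod (a ^ 2) m) (PySem.Int.floordiv (n - 1) 2) m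
    else
      modpowLoop prod (PySem.Int.mod (a ^ 2) m) (PySem.Int.floordiv n 2) m
  else prod
termination_by n.toNat
decreasing_by
  · rw [PySem.Int.floordiv_eq_ediv_of_pos (by norm_num : (0:Int) < 2)]; omega
  · rw [PySem.Int.floordiv_eq_ediv_of_pos (by norm_num : (0:Int) < 2)]; omega

def pyModpow (a n m : Int) : Int :=
  if n < 0 then modpowLoop 1 (pyInv a m) (-n) m else modpowLoop 1 a n m

-- tail of A after the search loop: Ak2 = modpow(Ak1,u,p)*modpow(A,v,p) % p; return c22*inv(Ak2,p) % p
-- (the catch-all branch is where Python raises TypeError on u = v = None; excluded by Pre_)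
def finishA (p A c22 Ak1 : Int) : Option Int × Option Int → Int
  | (some u, some v) =>
      PySem.Int.mod (c22 * pyInv (PySem.Int.mod (pyModpow Ak1 u p * pyModpow A v p) p) p) p
  | _ => 0

def relatedkeys (g : Int) (p : Int) (A : Int) (c11 : Int) (c12 : Int) (m1 : Int) (c21 : Int) (c22 : Int) : Int :=
  let Ak1 := PySem.Int.mod (c12 * pyInv m1 p) p
  let uv : Option Int × Option Int :=
    (PySem.List.pyRange 1 101 1).foldl (fun uv i =>
      (PySem.List.pyRange 1 101 1).foldl (fun uv j =>
        if PySem.Int.mod (pyModpow c11 i p * pyModpow g j p) p = c21 then (some i, some j) else uv)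
        uv)
      (none, none)
  finishA p A c22 Ak1 uv

-- ===== PORT B =====
-- if b == 0: return (1, 0);  x, y = egcd(b, a % b);  return (y, x - (a//b)*y)
def recEgcd (a b : Int) : Int × Int :=
  if hb : b = 0 then (1, 0)
  else
    match recEgcd b (PySem.Int.mod a b) with
    | (x, y) => (y, x - PySem.Int.floordiv a b * y)
termination_by b.natAbs
decreasing_by exact pmod_natAbs_lt a b hb

def invB (a b : Int) : Int := (recEgcd a b).1

-- tail of B: u, v = d[c21]; Ak2 = pow(Ak1,u,p)*pow(A,v,p) % p; return c22*inv(Ak2,p) % p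
-- (built-in pow(x,e,p) with e ≥ 0 is x**e % p; the none branch is Python's KeyError, excluded by Pre_)
def finishB (p A c22 Ak1 : Int) : Option (Int × Int) → Int
  | some (u, v) =>
      PySem.Int.mod (c22 * invB
        (PySem.Int.mod (PySem.Int.mod (Ak1 ^ u.toNat) p * PySem.Int.mod (A ^ v.toNat) p) p) p) p
  | none => 0

def relatedkeys_alt (g : Int) (p : Int) (A : Int) (c11 : Int) (c12 : Int) (m1 : Int) (c21 : Int) (c22 : Int) : Int :=
  let Ak1 := PySem.Int.mod (c12 * invB m1 p) p
  let st : Int × PySem.Dict Int (Int × Int) :=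
    (PySem.List.pyRange 1 101 1).foldl (fun s i =>
      let pi := PySem.Int.mod (s.1 * c11) p
      let t :=
        (PySem.List.pyRange 1 101 1).foldl (fun (t : Int × PySem.Dict Int (Int × Int)) j =>
          let pij := PySem.Int.mod (t.1 * g) p
          (pij, t.2.insert pij (i, j)))
          (pi, s.2)
      (pi, t.2))
      (1, PySem.Dict.empty)
  finishB p A c22 Ak1 (st.2.get? c21)

-- ===== PRECONDITION & SPEC =====
-- Python A raises outside this: ZeroDivisionError when p = 0, and TypeError (u stays None)
-- when no (i, j) in 1..100 × 1..100 satisfies c11^i * g^j ≡ c21 (mod p).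
def Pre_relatedkeys (g : Int) (p : Int) (A : Int) (c11 : Int) (c12 : Int) (m1 : Int) (c21 : Int) (c22 : Int) : Prop :=
  p ≠ 0 ∧ ∃ i ∈ PySem.List.pyRange 1 101 1, ∃ j ∈ PySem.List.pyRange 1 101 1,
    PySem.Int.mod (c11 ^ i.toNat * g ^ j.toNat) p = c21
instance (g : Int) (p : Int) (A : Int) (c11 : Int) (c12 : Int) (m1 : Int) (c21 : Int) (c22 : Int) : Decidable (Pre_relatedkeys g p A c11 c12 m1 c21 c22) := by unfold Pre_relatedkeys; infer_instance

def pvWitness_relatedkeys : Int × Int × Int × Int × Int × Int × Int × Int := (1, 3, 1, 1, 1, 1, 1, 1)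

def Spec_relatedkeys (g : Int) (p : Int) (A : Int) (c11 : Int) (c12 : Int) (m1 : Int) (c21 : Int) (c22 : Int) (out : Int) : Prop := out = relatedkeys_alt g p A c11 c12 m1 c21 c22
instance (g : Int) (p : Int) (A : Int) (c11 : Int) (c12 : Int) (m1 : Int) (c21 : Int) (c22 : Int) (out : Int) : Decidable (Spec_relatedkeys g p A c11 c12 m1 c21 c22 out) := by unfold Spec_relatedkeys; infer_instance

-- ===== CLAIM (what is proved, stated in full; the proofs are below) =====
def Claim_equal_relatedkeys : Prop := ∀ (g : Int) (p : Int) (A : Int) (c11 : Int) (c12 : Int) (m1 : Int) (c21 : Int) (c22 : Int), Dom_relatedkeys g p A c11 c12 m1 c21 c22 → Pre_relatedkeys g p A c11 c12 m1 c21 c22 → Spec_relatedkeys g p A c11 c12 m1 c21 c22 (relatedkeys g p A c11 c12 m1 c21 c22)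

-- ===== LEMMAS AND PROOFS =====

-- A's iterative extended-Euclid state is linear in (x1, x2) with recEgcd's coefficients
theorem invLoop_linear : ∀ (k : Nat) (b : Int), b.natAbs = k → ∀ (x1 y1 x2 y2 a : Int),
    invLoop x1 y1 x2 y2 a b = x1 * (recEgcd a b).1 + x2 * (recEgcd a b).2 := by
  intro k
  induction k using Nat.strong_induction_on with
  | _ k ih =>
    intro b hk x1 y1 x2 y2 a
    by_cases hb : b = 0
    · subst hb
      rw [invLoop, recEgcd]
      simp
    · rw [invLoop, dif_neg hb, recEgcd, dif_neg hb]
      have hlt : (PySem.Int.mod a b).natAbs < k := hk ▸ pmod_natAbs_lt a b hb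
      rw [ih _ hlt _ rfl]
      rcases h : recEgcd b (PySem.Int.mod a b) with ⟨x, y⟩
      simp only []
      ring

theorem inv_eq (a b : Int) : pyInv a b = invB a b := by
  unfold pyInv invB
  rw [invLoop_linear b.natAbs b rfl]
  ring

-- the value both programs key the search on
def kf (c11 g p i j : Int) : Int := PySem.Int.mod (c11 ^ i.toNat * g ^ j.toNat) p

theorem pmod_add_mul (p x k : Int) (hp : p ≠ 0) :
    PySem.Int.mod (x + k * p) p = PySem.Int.mod x p := by
  rcases lt_or_gt_of_ne hp with h | h
  · have e : ∀ y : Int, PySem.Int.mod y p = -PySem.Int.mod (-y) (-p) := by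
      intro y
      have h := PySem.Int.mod_neg_neg (-y) (-p)
      rw [neg_neg, neg_neg] at h
      exact h
    rw [e (x + k * p), e x]
    have hnp : (0:Int) < -p := by omega
    rw [PySem.Int.mod_eq_emod_of_pos hnp, PySem.Int.mod_eq_emod_of_pos hnp]
    have : -(x + k * p) = -x + k * -p := by ring
    rw [this, Int.add_mul_emod_self_right]
  · rw [PySem.Int.mod_eq_emod_of_pos h, PySem.Int.mod_eq_emod_of_pos h,
      Int.add_mul_emod_self_right]

theorem pmod_mul_congr (p a b y : Int) (hp : p ≠ 0)
    (h : PySem.Int.mod a p = PySem.Int.mod b p) :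
    PySem.Int.mod (a * y) p = PySem.Int.mod (b * y) p := by
  have ha : a * y = PySem.Int.mod a p * y + (PySem.Int.floordiv a p * y) * p := by
    linear_combination y * (PySem.Int.floordiv_mul_add_mod a p).symm
  have hb : b * y = PySem.Int.mod b p * y + (PySem.Int.floordiv b p * y) * p := by
    linear_combination y * (PySem.Int.floordiv_mul_add_mod b p).symm
  rw [ha, hb, pmod_add_mul _ _ _ hp, pmod_add_mul _ _ _ hp, h]

theorem pmod_idem (p a : Int) (hp : p ≠ 0) :
    PySem.Int.mod (PySem.Int.mod a p) p = PySem.Int.mod a p := by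
  have ha : PySem.Int.mod a p = a + (-(PySem.Int.floordiv a p)) * p := by
    linear_combination PySem.Int.floordiv_mul_add_mod a p
  calc PySem.Int.mod (PySem.Int.mod a p) p
      = PySem.Int.mod (a + (-(PySem.Int.floordiv a p)) * p) p := by rw [← ha]
    _ = PySem.Int.mod a p := pmod_add_mul _ _ _ hp

theorem pmod_mul_left (p a y : Int) (hp : p ≠ 0) :
    PySem.Int.mod (PySem.Int.mod a p * y) p = PySem.Int.mod (a * y) p :=
  pmod_mul_congr p _ a y hp (pmod_idem p a hp)

theorem pmod_mul_right (p a y : Int) (hp : p ≠ 0) :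
    PySem.Int.mod (y * PySem.Int.mod a p) p = PySem.Int.mod (y * a) p := by
  rw [mul_comm y _, mul_comm y a]; exact pmod_mul_left p a y hp

theorem pmod_pow (p a : Int) (k : Nat) (hp : p ≠ 0) :
    PySem.Int.mod (PySem.Int.mod a p ^ k) p = PySem.Int.mod (a ^ k) p := by
  induction k with
  | zero => simp
  | succ k ih =>
      rw [pow_succ, pow_succ, pmod_mul_congr p _ (a ^ k) (PySem.Int.mod a p) hp ih,
        pmod_mul_right p a (a ^ k) hp]

theorem modpowLoop_eq (m : Int) (hm : m ≠ 0) :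
    ∀ (k : Nat) (n prod a : Int), n.toNat = k → 0 < n →
      modpowLoop prod a n m = PySem.Int.mod (prod * a ^ n.toNat) m := by
  intro k
  induction k using Nat.strong_induction_on with
  | _ k ih =>
    intro n prod a hk hn
    subst hk
    rw [modpowLoop, dif_pos hn]
    have h2 : (0:Int) < 2 := by norm_num
    by_cases ho : PySem.Int.mod n 2 = 1
    · rw [if_pos ho]
      rw [PySem.Int.mod_eq_emod_of_pos h2] at ho
      rw [PySem.Int.floordiv_eq_ediv_of_pos h2]
      by_cases h0 : 0 < (n - 1) / 2
      · have hlt : ((n - 1) / 2).toNat < n.toNat := by omega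
        rw [ih _ hlt ((n - 1) / 2) _ _ rfl h0]
        have hodd : n.toNat = 2 * ((n - 1) / 2).toNat + 1 := by omega
        calc PySem.Int.mod (PySem.Int.mod (prod * a) m * PySem.Int.mod (a ^ 2) m ^ ((n - 1) / 2).toNat) m
            = PySem.Int.mod (prod * a * PySem.Int.mod (a ^ 2) m ^ ((n - 1) / 2).toNat) m :=
              pmod_mul_left m (prod * a) _ hm
          _ = PySem.Int.mod (PySem.Int.mod (a ^ 2) m ^ ((n - 1) / 2).toNat * (prod * a)) m := by
              rw [mul_comm]
          _ = PySem.Int.mod ((a ^ 2) ^ ((n - 1) / 2).toNat * (prod * a)) m :=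
              pmod_mul_congr m _ _ _ hm (pmod_pow m (a ^ 2) _ hm)
          _ = PySem.Int.mod (prod * a ^ n.toNat) m := by rw [hodd]; ring_nf
      · have hn1 : (n - 1) / 2 = 0 := by omega
        have hone : n = 1 := by omega
        rw [hn1, modpowLoop, dif_neg (by norm_num : ¬ (0:Int) < 0), hone]
        norm_num
    · rw [if_neg ho]
      rw [PySem.Int.mod_eq_emod_of_pos h2] at ho
      have hev : n % 2 = 0 := by omega
      rw [PySem.Int.floordiv_eq_ediv_of_pos h2]
      have h0 : 0 < n / 2 := by omega
      have hlt : (n / 2).toNat < n.toNat := by omega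
      rw [ih _ hlt (n / 2) _ _ rfl h0]
      have heq : n.toNat = 2 * (n / 2).toNat := by omega
      calc PySem.Int.mod (prod * PySem.Int.mod (a ^ 2) m ^ (n / 2).toNat) m
          = PySem.Int.mod (PySem.Int.mod (a ^ 2) m ^ (n / 2).toNat * prod) m := by rw [mul_comm]
        _ = PySem.Int.mod ((a ^ 2) ^ (n / 2).toNat * prod) m :=
            pmod_mul_congr m _ _ _ hm (pmod_pow m (a ^ 2) _ hm)
        _ = PySem.Int.mod (prod * a ^ n.toNat) m := by rw [heq]; ring_nf

theorem modpow_eq (a n m : Int) (hm : m ≠ 0) (hn : 0 < n) :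
    pyModpow a n m = PySem.Int.mod (a ^ n.toNat) m := by
  unfold pyModpow
  rw [if_neg (by omega), modpowLoop_eq m hm n.toNat n 1 a rfl hn, one_mul]

-- B's inner loop builds the same dict as the clean per-key insertion fold
theorem B_inner (c11 g p : Int) (hp : p ≠ 0) (i : Int) :
    ∀ (k : Nat) (s : Int), (101 - s).toNat = k → 1 ≤ s →
      ∀ (d : PySem.Dict Int (Int × Int)) (w : Int),
        PySem.Int.mod w p = PySem.Int.mod (c11 ^ i.toNat * g ^ (s - 1).toNat) p →
        ((PySem.List.pyRange s 101 1).foldl (fun (t : Int × PySem.Dict Int (Int × Int)) j =>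
            (PySem.Int.mod (t.1 * g) p, t.2.insert (PySem.Int.mod (t.1 * g) p) (i, j))) (w, d)).2
          = (PySem.List.pyRange s 101 1).foldl (fun d j => d.insert (kf c11 g p i j) (i, j)) d := by
  intro k
  induction k with
  | zero =>
      intro s hk _hs d w _hw
      rw [PySem.List.pyRange_one_eq_nil (by omega)]
      simp
  | succ k ih =>
      intro s hk hs d w hw
      have hs101 : s < 101 := by omega
      rw [PySem.List.pyRange_one_cons hs101]
      simp only [List.foldl_cons]
      have hkey : PySem.Int.mod (w * g) p = kf c11 g p i s := by
        rw [pmod_mul_congr p w (c11 ^ i.toNat * g ^ (s - 1).toNat) g hp hw]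
        unfold kf
        have hsucc : (s - 1).toNat + 1 = s.toNat := by omega
        rw [← hsucc, pow_succ, mul_assoc]
      rw [hkey]
      apply ih (s + 1) (by omega) (by omega)
      have hs1 : s + 1 - 1 = s := by ring
      rw [hs1]
      unfold kf
      exact pmod_idem p _ hp

theorem B_outer (c11 g p : Int) (hp : p ≠ 0) :
    ∀ (k : Nat) (s : Int), (101 - s).toNat = k → 1 ≤ s →
      ∀ (d : PySem.Dict Int (Int × Int)) (pi : Int),
        PySem.Int.mod pi p = PySem.Int.mod (c11 ^ (s - 1).toNat) p →
        ((PySem.List.pyRange s 101 1).foldl (fun (st : Int × PySem.Dict Int (Int × Int)) i =>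
            (PySem.Int.mod (st.1 * c11) p,
             ((PySem.List.pyRange 1 101 1).foldl (fun (t : Int × PySem.Dict Int (Int × Int)) j =>
                (PySem.Int.mod (t.1 * g) p, t.2.insert (PySem.Int.mod (t.1 * g) p) (i, j)))
               (PySem.Int.mod (st.1 * c11) p, st.2)).2)) (pi, d)).2
          = (PySem.List.pyRange s 101 1).foldl (fun d i =>
              (PySem.List.pyRange 1 101 1).foldl (fun d j => d.insert (kf c11 g p i j) (i, j)) d) d := by
  intro k
  induction k with
  | zero =>
      intro s hk _hs d pi _hpi
      rw [PySem.List.pyRange_one_eq_nil (a := s) (by omega)]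
      simp
  | succ k ih =>
      intro s hk hs d pi hpi
      have hs101 : s < 101 := by omega
      rw [PySem.List.pyRange_one_cons hs101]
      simp only [List.foldl_cons]
      have hpi' : PySem.Int.mod (PySem.Int.mod (pi * c11) p) p = PySem.Int.mod (c11 ^ s.toNat) p := by
        rw [pmod_idem p _ hp, pmod_mul_congr p pi (c11 ^ (s - 1).toNat) c11 hp hpi]
        have hsucc : (s - 1).toNat + 1 = s.toNat := by omega
        rw [← hsucc, pow_succ]
      have hin := B_inner c11 g p hp s 100 1 (by decide) (by norm_num) d (PySem.Int.mod (pi * c11) p)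
        (by rw [hpi']; norm_num)
      rw [hin]
      apply ih (s + 1) (by omega) (by omega)
      have hs1 : s + 1 - 1 = s := by ring
      rw [hs1]
      exact hpi'

-- translating a dict built by insertions into A's last-match fold state
def toUV : Option (Int × Int) → Option Int × Option Int
  | some (u, v) => (some u, some v)
  | none => (none, none)

theorem match_inner (c11 g p c21 : Int) (i : Int) :
    ∀ (js : List Int) (d : PySem.Dict Int (Int × Int)) (uv : Option Int × Option Int),
      toUV (d.get? c21) = uv →
      toUV ((js.foldl (fun d j => d.insert (kf c11 g p i j) (i, j)) d).get? c21)
        = js.foldl (fun uv j => if kf c11 g p i j = c21 then (some i, some j) else uv) uv := by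
  intro js
  induction js with
  | nil => intro d uv h; simpa using h
  | cons j js ih =>
      intro d uv h
      simp only [List.foldl_cons]
      by_cases hj : kf c11 g p i j = c21
      · rw [if_pos hj]
        exact ih _ _ (by rw [PySem.Dict.get?_insert, if_pos hj.symm]; rfl)
      · rw [if_neg hj]
        exact ih _ _ (by rw [PySem.Dict.get?_insert, if_neg (fun hc => hj hc.symm)]; exact h)

theorem match_outer (c11 g p c21 : Int) :
    ∀ (is : List Int) (d : PySem.Dict Int (Int × Int)) (uv : Option Int × Option Int),
      toUV (d.get? c21) = uv →
      toUV ((is.foldl (fun d i =>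
              (PySem.List.pyRange 1 101 1).foldl (fun d j => d.insert (kf c11 g p i j) (i, j)) d) d).get? c21)
        = is.foldl (fun uv i =>
            (PySem.List.pyRange 1 101 1).foldl
              (fun uv j => if kf c11 g p i j = c21 then (some i, some j) else uv) uv) uv := by
  intro is
  induction is with
  | nil => intro d uv h; simpa using h
  | cons i is ih =>
      intro d uv h
      simp only [List.foldl_cons]
      exact ih _ _ (match_inner c11 g p c21 i _ d uv h)

-- A's test at (i, j) with 0 < i, 0 < j is the key value kf
theorem A_test (c11 g p : Int) (hp : p ≠ 0) (i j : Int) (hi : 0 < i) (hj : 0 < j) :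
    PySem.Int.mod (pyModpow c11 i p * pyModpow g j p) p = kf c11 g p i j := by
  rw [modpow_eq c11 i p hp hi, modpow_eq g j p hp hj, kf,
    pmod_mul_left p _ _ hp, pmod_mul_right p _ _ hp]

-- invariant: A's search fold only ever holds (none, none) or positive (some u, some v)
def Puv (uv : Option Int × Option Int) : Prop :=
  uv = (none, none) ∨ ∃ u v, uv = (some u, some v) ∧ 0 < u ∧ 0 < v

theorem Puv_inner (c11 g p c21 i : Int) (hi : 0 < i) :
    ∀ (js : List Int), (∀ j ∈ js, 0 < j) → ∀ uv, Puv uv →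
      Puv (js.foldl (fun uv j => if kf c11 g p i j = c21 then (some i, some j) else uv) uv) := by
  intro js
  induction js with
  | nil => intro _ uv h; simpa using h
  | cons j js ih =>
      intro hall uv h
      simp only [List.foldl_cons]
      apply ih (fun x hx => hall x (List.mem_cons_of_mem _ hx))
      by_cases hj : kf c11 g p i j = c21
      · rw [if_pos hj]
        exact Or.inr ⟨i, j, rfl, hi, hall j (List.mem_cons_self ..)⟩
      · rw [if_neg hj]; exact h

theorem Puv_outer (c11 g p c21 : Int) :
    ∀ (is : List Int), (∀ i ∈ is, 0 < i) → ∀ uv, Puv uv →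
      Puv (is.foldl (fun uv i =>
        (PySem.List.pyRange 1 101 1).foldl
          (fun uv j => if kf c11 g p i j = c21 then (some i, some j) else uv) uv) uv) := by
  intro is
  induction is with
  | nil => intro _ uv h; simpa using h
  | cons i is ih =>
      intro hall uv h
      simp only [List.foldl_cons]
      apply ih (fun x hx => hall x (List.mem_cons_of_mem _ hx))
      apply Puv_inner c11 g p c21 i (hall i (List.mem_cons_self ..))
      · intro j hj
        have := PySem.List.mem_pyRange_one.mp hj
        omega
      · exact h

-- ===== VERDICT (by name: the statement is the Claim_ definition above) =====
set_option maxRecDepth 8000 in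
theorem relatedkeys_spec : Claim_equal_relatedkeys := by
  intro g p A c11 c12 m1 c21 c22 _hDom hPre
  obtain ⟨hp, -⟩ := hPre
  simp only [Spec_relatedkeys, relatedkeys, relatedkeys_alt]
  rw [inv_eq m1 p]
  have hA : List.foldl (fun (uv : Option Int × Option Int) i =>
        List.foldl (fun uv j =>
          if PySem.Int.mod (pyModpow c11 i p * pyModpow g j p) p = c21 then (some i, some j) else uv)
          uv (PySem.List.pyRange 1 101 1)) (none, none) (PySem.List.pyRange 1 101 1)
      = List.foldl (fun (uv : Option Int × Option Int) i =>
        List.foldl (fun uv j =>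
          if kf c11 g p i j = c21 then (some i, some j) else uv)
          uv (PySem.List.pyRange 1 101 1)) (none, none) (PySem.List.pyRange 1 101 1) := by
    apply PySem.List.foldl_congr_mem
    intro acc i hi
    apply PySem.List.foldl_congr_mem
    intro acc2 j hj
    rw [A_test c11 g p hp i j (by have := PySem.List.mem_pyRange_one.mp hi; omega)
      (by have := PySem.List.mem_pyRange_one.mp hj; omega)]
  have hB := B_outer c11 g p hp 100 1 (by decide) (by norm_num) PySem.Dict.empty 1 (by norm_num)
  have hM := match_outer c11 g p c21 (PySem.List.pyRange 1 101 1) PySem.Dict.empty (none, none)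
    (by simp [toUV, PySem.Dict.get?_empty])
  have hP := Puv_outer c11 g p c21 (PySem.List.pyRange 1 101 1)
    (fun i hi => by have := PySem.List.mem_pyRange_one.mp hi; omega) (none, none) (Or.inl rfl)
  rw [hA, ← hM, hB]
  rw [← hM] at hP
  revert hP
  generalize ((PySem.List.pyRange 1 101 1).foldl (fun d i =>
      (PySem.List.pyRange 1 101 1).foldl (fun d j => d.insert (kf c11 g p i j) (i, j)) d)
      PySem.Dict.empty).get? c21 = o
  intro hP
  rcases o with _ | ⟨u, v⟩
  · rfl
  · rcases hP with h0 | ⟨u', v', huv, hu, hv⟩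
    · exact absurd h0 (by simp [toUV])
    · simp only [toUV, Prod.mk.injEq, Option.some.injEq] at huv
      obtain ⟨hu1, hv1⟩ := huv
      subst hu1; subst hv1
      simp only [toUV, finishA, finishB]
      rw [modpow_eq _ u p hp hu, modpow_eq _ v p hp hv, inv_eq]
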